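-- pv_equiv track=rewrite | github.com/Okabe-Junya/AtCoderArchive | ABC/151-200/193/d.py | solve
-- ===== SOURCE A (Python) =====
-- def solve(s, t):
--     s_score = 0
--     t_score = 0
--     for i in range(1, 10):
--         tmp_s = 0
--         tmp_t = 0
--         for m in s:
--             if m == str(i):
--                 tmp_s += 1
--         for n in t:
--             if n == str(i):
--                 tmp_t += 1
--         s_score += i * (10 ** tmp_s)
--         t_score += i * (10 ** tmp_t)
--     if s_score > t_score:
--         return True
--     else:
--         return False
-- ===== SOURCE B (Python) =====
-- def solve(s, t):
--     def score(x):
--         contrib = [0, 1, 2, 3, 4, 5, 6, 7, 8, 9]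
--         total = 45
--         for ch in x:
--             d = ord(ch) - 48
--             if 1 <= d <= 9:
--                 total += 9 * contrib[d]
--                 contrib[d] *= 10
--         return total
--     return score(s) > score(t)
-- ===== Notes on version B (the rewrite author's own statement) =====
-- stated objective: faster
-- what changed: B makes one incremental pass per string, keeping each digit's current contribution d*10^(occurrences seen so far) in a small array and adding 9*contrib on each occurrence, so the score is built multiplicatively with no digit counting and no power computation; A rescans both strings nine times and raises 10 to the counted power.
import Mathlib
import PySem

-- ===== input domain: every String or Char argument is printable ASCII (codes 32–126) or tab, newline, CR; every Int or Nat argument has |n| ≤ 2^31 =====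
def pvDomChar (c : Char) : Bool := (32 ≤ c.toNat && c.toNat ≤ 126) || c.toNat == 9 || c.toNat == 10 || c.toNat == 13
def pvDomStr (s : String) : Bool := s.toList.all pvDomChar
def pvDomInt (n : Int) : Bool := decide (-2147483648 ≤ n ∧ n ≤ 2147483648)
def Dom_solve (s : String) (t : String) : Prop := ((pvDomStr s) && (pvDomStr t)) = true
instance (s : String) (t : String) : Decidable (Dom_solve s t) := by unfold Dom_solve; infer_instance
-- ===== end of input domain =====

-- B replaces A's nine full rescans + power computation with ONE incremental pass per
-- string: it keeps each digit's current contribution d*10^(occurrences seen so far)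
-- in a 10-slot array and adds 9*contrib[d] to a running total at each occurrence.

-- ===== PORT A =====
-- Python iterates a string yielding 1-char strings, so 'm == str(i)' compares the
-- 1-char string of m with str(i): ported as String.ofList [m] == toStr i (exact).
-- tmp_s/tmp_t are nonnegative int counters, so '.toNat' in '10 ** tmp' is exact.
def solve (s : String) (t : String) : Bool :=
  let r := (PySem.List.pyRange 1 10 1).foldl (fun (acc : Int × Int) i =>
    let tmp_s : Int := s.toList.foldl
      (fun (a : Int) m => if String.ofList [m] == PySem.Int.toStr i then a + 1 else a) 0
    let tmp_t : Int := t.toList.foldl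
      (fun (a : Int) n => if String.ofList [n] == PySem.Int.toStr i then a + 1 else a) 0
    (acc.1 + i * 10 ^ tmp_s.toNat, acc.2 + i * 10 ^ tmp_t.toNat)) (0, 0)
  if r.1 > r.2 then true else false

-- ===== PORT B =====
-- Source B's loop body: d = ord(ch) - 48 (ord = codepoint = Char.toNat, exact); the
-- guarded branch updates total and contrib[d]; contrib[d] read/write is ported as
-- List.getD/List.set (the guard keeps the index in range, so getD's default is dead).
def pvStep (st : Int × List Int) (ch : Char) : Int × List Int :=
  let d : Int := (ch.toNat : Int) - 48
  if 1 ≤ d ∧ d ≤ 9 then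
    (st.1 + 9 * st.2.getD d.toNat 0, st.2.set d.toNat (st.2.getD d.toNat 0 * 10))
  else st

def pvScore (x : String) : Int :=
  (x.toList.foldl pvStep (45, [0, 1, 2, 3, 4, 5, 6, 7, 8, 9])).1

def solve_alt (s : String) (t : String) : Bool :=
  decide (pvScore s > pvScore t)

-- ===== PRECONDITION & SPEC =====
def Spec_solve (s : String) (t : String) (out : Bool) : Prop := out = solve_alt s t
instance (s : String) (t : String) (out : Bool) : Decidable (Spec_solve s t out) := by unfold Spec_solve; infer_instance

-- ===== CLAIM (what is proved, stated in full; the proofs are below) =====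
def Claim_equal_solve : Prop := ∀ (s : String) (t : String), Dom_solve s t → Spec_solve s t (solve s t)

-- ===== LEMMAS AND PROOFS =====

theorem one_char_eq (m c : Char) : (String.ofList [m] == String.ofList [c]) = (m == c) := by
  rcases eq_or_ne m c with h | h
  · simp [h]
  · have : String.ofList [m] ≠ String.ofList [c] :=
      fun he => h (by simpa using congrArg String.toList he)
    simp [h, this]

theorem inner_count (l : List Char) (c : Char) :
    l.foldl (fun (a : Int) m => if String.ofList [m] == String.ofList [c] then a + 1 else a) 0
      = (l.count c : Int) := by
  have := PySem.List.foldl_beq_add_one (l := l) (v := c) (a := (0:Int))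
  simp only [one_char_eq]
  simpa using this

-- loop invariant of B's single pass: if contrib[d] = d*10^(c_d) and the total is
-- Σ d*10^(c_d), folding pvStep over l bumps each exponent by l's count of that digit.
theorem tally_inv (l : List Char) : ∀ (c1 c2 c3 c4 c5 c6 c7 c8 c9 : Nat),
    l.foldl pvStep (1 * (10:Int) ^ (c1) + 2 * (10:Int) ^ (c2) + 3 * (10:Int) ^ (c3) + 4 * (10:Int) ^ (c4) + 5 * (10:Int) ^ (c5) + 6 * (10:Int) ^ (c6) + 7 * (10:Int) ^ (c7) + 8 * (10:Int) ^ (c8) + 9 * (10:Int) ^ (c9), [0, 1 * (10:Int) ^ (c1), 2 * (10:Int) ^ (c2), 3 * (10:Int) ^ (c3), 4 * (10:Int) ^ (c4), 5 * (10:Int) ^ (c5), 6 * (10:Int) ^ (c6), 7 * (10:Int) ^ (c7), 8 * (10:Int) ^ (c8), 9 * (10:Int) ^ (c9)])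
      = (1 * (10:Int) ^ (c1 + l.count '1') + 2 * (10:Int) ^ (c2 + l.count '2') + 3 * (10:Int) ^ (c3 + l.count '3') + 4 * (10:Int) ^ (c4 + l.count '4') + 5 * (10:Int) ^ (c5 + l.count '5') + 6 * (10:Int) ^ (c6 + l.count '6') + 7 * (10:Int) ^ (c7 + l.count '7') + 8 * (10:Int) ^ (c8 + l.count '8') + 9 * (10:Int) ^ (c9 + l.count '9'), [0, 1 * (10:Int) ^ (c1 + l.count '1'), 2 * (10:Int) ^ (c2 + l.count '2'), 3 * (10:Int) ^ (c3 + l.count '3'), 4 * (10:Int) ^ (c4 + l.count '4'), 5 * (10:Int) ^ (c5 + l.count '5'), 6 * (10:Int) ^ (c6 + l.count '6'), 7 * (10:Int) ^ (c7 + l.count '7'), 8 * (10:Int) ^ (c8 + l.count '8'), 9 * (10:Int) ^ (c9 + l.count '9')]) := by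
  induction l with
  | nil => intro c1 c2 c3 c4 c5 c6 c7 c8 c9; simp
  | cons ch l ih =>
  intro c1 c2 c3 c4 c5 c6 c7 c8 c9
  by_cases h1 : ch = '1'
  · subst h1
    have hstep : pvStep (1 * (10:Int) ^ (c1) + 2 * (10:Int) ^ (c2) + 3 * (10:Int) ^ (c3) + 4 * (10:Int) ^ (c4) + 5 * (10:Int) ^ (c5) + 6 * (10:Int) ^ (c6) + 7 * (10:Int) ^ (c7) + 8 * (10:Int) ^ (c8) + 9 * (10:Int) ^ (c9), [0, 1 * (10:Int) ^ (c1), 2 * (10:Int) ^ (c2), 3 * (10:Int) ^ (c3), 4 * (10:Int) ^ (c4), 5 * (10:Int) ^ (c5), 6 * (10:Int) ^ (c6), 7 * (10:Int) ^ (c7), 8 * (10:Int) ^ (c8), 9 * (10:Int) ^ (c9)]) '1'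
        = (1 * (10:Int) ^ ((c1 + 1)) + 2 * (10:Int) ^ (c2) + 3 * (10:Int) ^ (c3) + 4 * (10:Int) ^ (c4) + 5 * (10:Int) ^ (c5) + 6 * (10:Int) ^ (c6) + 7 * (10:Int) ^ (c7) + 8 * (10:Int) ^ (c8) + 9 * (10:Int) ^ (c9), [0, 1 * (10:Int) ^ ((c1 + 1)), 2 * (10:Int) ^ (c2), 3 * (10:Int) ^ (c3), 4 * (10:Int) ^ (c4), 5 * (10:Int) ^ (c5), 6 * (10:Int) ^ (c6), 7 * (10:Int) ^ (c7), 8 * (10:Int) ^ (c8), 9 * (10:Int) ^ (c9)]) := by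
      simp only [pvStep, show Char.toNat '1' = 49 from rfl]
      norm_num [show Int.toNat 1 = 1 from rfl, List.getD, List.set]
      and_intros <;> ring
    rw [List.foldl_cons, hstep, ih]
    simp
    ring
  by_cases h2 : ch = '2'
  · subst h2
    have hstep : pvStep (1 * (10:Int) ^ (c1) + 2 * (10:Int) ^ (c2) + 3 * (10:Int) ^ (c3) + 4 * (10:Int) ^ (c4) + 5 * (10:Int) ^ (c5) + 6 * (10:Int) ^ (c6) + 7 * (10:Int) ^ (c7) + 8 * (10:Int) ^ (c8) + 9 * (10:Int) ^ (c9), [0, 1 * (10:Int) ^ (c1), 2 * (10:Int) ^ (c2), 3 * (10:Int) ^ (c3), 4 * (10:Int) ^ (c4), 5 * (10:Int) ^ (c5), 6 * (10:Int) ^ (c6), 7 * (10:Int) ^ (c7), 8 * (10:Int) ^ (c8), 9 * (10:Int) ^ (c9)]) '2'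
        = (1 * (10:Int) ^ (c1) + 2 * (10:Int) ^ ((c2 + 1)) + 3 * (10:Int) ^ (c3) + 4 * (10:Int) ^ (c4) + 5 * (10:Int) ^ (c5) + 6 * (10:Int) ^ (c6) + 7 * (10:Int) ^ (c7) + 8 * (10:Int) ^ (c8) + 9 * (10:Int) ^ (c9), [0, 1 * (10:Int) ^ (c1), 2 * (10:Int) ^ ((c2 + 1)), 3 * (10:Int) ^ (c3), 4 * (10:Int) ^ (c4), 5 * (10:Int) ^ (c5), 6 * (10:Int) ^ (c6), 7 * (10:Int) ^ (c7), 8 * (10:Int) ^ (c8), 9 * (10:Int) ^ (c9)]) := by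
      simp only [pvStep, show Char.toNat '2' = 50 from rfl]
      norm_num [show Int.toNat 2 = 2 from rfl, List.getD, List.set]
      and_intros <;> ring
    rw [List.foldl_cons, hstep, ih]
    simp
    ring
  by_cases h3 : ch = '3'
  · subst h3
    have hstep : pvStep (1 * (10:Int) ^ (c1) + 2 * (10:Int) ^ (c2) + 3 * (10:Int) ^ (c3) + 4 * (10:Int) ^ (c4) + 5 * (10:Int) ^ (c5) + 6 * (10:Int) ^ (c6) + 7 * (10:Int) ^ (c7) + 8 * (10:Int) ^ (c8) + 9 * (10:Int) ^ (c9), [0, 1 * (10:Int) ^ (c1), 2 * (10:Int) ^ (c2), 3 * (10:Int) ^ (c3), 4 * (10:Int) ^ (c4), 5 * (10:Int) ^ (c5), 6 * (10:Int) ^ (c6), 7 * (10:Int) ^ (c7), 8 * (10:Int) ^ (c8), 9 * (10:Int) ^ (c9)]) '3'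
        = (1 * (10:Int) ^ (c1) + 2 * (10:Int) ^ (c2) + 3 * (10:Int) ^ ((c3 + 1)) + 4 * (10:Int) ^ (c4) + 5 * (10:Int) ^ (c5) + 6 * (10:Int) ^ (c6) + 7 * (10:Int) ^ (c7) + 8 * (10:Int) ^ (c8) + 9 * (10:Int) ^ (c9), [0, 1 * (10:Int) ^ (c1), 2 * (10:Int) ^ (c2), 3 * (10:Int) ^ ((c3 + 1)), 4 * (10:Int) ^ (c4), 5 * (10:Int) ^ (c5), 6 * (10:Int) ^ (c6), 7 * (10:Int) ^ (c7), 8 * (10:Int) ^ (c8), 9 * (10:Int) ^ (c9)]) := by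
      simp only [pvStep, show Char.toNat '3' = 51 from rfl]
      norm_num [show Int.toNat 3 = 3 from rfl, List.getD, List.set]
      and_intros <;> ring
    rw [List.foldl_cons, hstep, ih]
    simp
    ring
  by_cases h4 : ch = '4'
  · subst h4
    have hstep : pvStep (1 * (10:Int) ^ (c1) + 2 * (10:Int) ^ (c2) + 3 * (10:Int) ^ (c3) + 4 * (10:Int) ^ (c4) + 5 * (10:Int) ^ (c5) + 6 * (10:Int) ^ (c6) + 7 * (10:Int) ^ (c7) + 8 * (10:Int) ^ (c8) + 9 * (10:Int) ^ (c9), [0, 1 * (10:Int) ^ (c1), 2 * (10:Int) ^ (c2), 3 * (10:Int) ^ (c3), 4 * (10:Int) ^ (c4), 5 * (10:Int) ^ (c5), 6 * (10:Int) ^ (c6), 7 * (10:Int) ^ (c7), 8 * (10:Int) ^ (c8), 9 * (10:Int) ^ (c9)]) '4'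
        = (1 * (10:Int) ^ (c1) + 2 * (10:Int) ^ (c2) + 3 * (10:Int) ^ (c3) + 4 * (10:Int) ^ ((c4 + 1)) + 5 * (10:Int) ^ (c5) + 6 * (10:Int) ^ (c6) + 7 * (10:Int) ^ (c7) + 8 * (10:Int) ^ (c8) + 9 * (10:Int) ^ (c9), [0, 1 * (10:Int) ^ (c1), 2 * (10:Int) ^ (c2), 3 * (10:Int) ^ (c3), 4 * (10:Int) ^ ((c4 + 1)), 5 * (10:Int) ^ (c5), 6 * (10:Int) ^ (c6), 7 * (10:Int) ^ (c7), 8 * (10:Int) ^ (c8), 9 * (10:Int) ^ (c9)]) := by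
      simp only [pvStep, show Char.toNat '4' = 52 from rfl]
      norm_num [show Int.toNat 4 = 4 from rfl, List.getD, List.set]
      and_intros <;> ring
    rw [List.foldl_cons, hstep, ih]
    simp
    ring
  by_cases h5 : ch = '5'
  · subst h5
    have hstep : pvStep (1 * (10:Int) ^ (c1) + 2 * (10:Int) ^ (c2) + 3 * (10:Int) ^ (c3) + 4 * (10:Int) ^ (c4) + 5 * (10:Int) ^ (c5) + 6 * (10:Int) ^ (c6) + 7 * (10:Int) ^ (c7) + 8 * (10:Int) ^ (c8) + 9 * (10:Int) ^ (c9), [0, 1 * (10:Int) ^ (c1), 2 * (10:Int) ^ (c2), 3 * (10:Int) ^ (c3), 4 * (10:Int) ^ (c4), 5 * (10:Int) ^ (c5), 6 * (10:Int) ^ (c6), 7 * (10:Int) ^ (c7), 8 * (10:Int) ^ (c8), 9 * (10:Int) ^ (c9)]) '5'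
        = (1 * (10:Int) ^ (c1) + 2 * (10:Int) ^ (c2) + 3 * (10:Int) ^ (c3) + 4 * (10:Int) ^ (c4) + 5 * (10:Int) ^ ((c5 + 1)) + 6 * (10:Int) ^ (c6) + 7 * (10:Int) ^ (c7) + 8 * (10:Int) ^ (c8) + 9 * (10:Int) ^ (c9), [0, 1 * (10:Int) ^ (c1), 2 * (10:Int) ^ (c2), 3 * (10:Int) ^ (c3), 4 * (10:Int) ^ (c4), 5 * (10:Int) ^ ((c5 + 1)), 6 * (10:Int) ^ (c6), 7 * (10:Int) ^ (c7), 8 * (10:Int) ^ (c8), 9 * (10:Int) ^ (c9)]) := by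
      simp only [pvStep, show Char.toNat '5' = 53 from rfl]
      norm_num [show Int.toNat 5 = 5 from rfl, List.getD, List.set]
      and_intros <;> ring
    rw [List.foldl_cons, hstep, ih]
    simp
    ring
  by_cases h6 : ch = '6'
  · subst h6
    have hstep : pvStep (1 * (10:Int) ^ (c1) + 2 * (10:Int) ^ (c2) + 3 * (10:Int) ^ (c3) + 4 * (10:Int) ^ (c4) + 5 * (10:Int) ^ (c5) + 6 * (10:Int) ^ (c6) + 7 * (10:Int) ^ (c7) + 8 * (10:Int) ^ (c8) + 9 * (10:Int) ^ (c9), [0, 1 * (10:Int) ^ (c1), 2 * (10:Int) ^ (c2), 3 * (10:Int) ^ (c3), 4 * (10:Int) ^ (c4), 5 * (10:Int) ^ (c5), 6 * (10:Int) ^ (c6), 7 * (10:Int) ^ (c7), 8 * (10:Int) ^ (c8), 9 * (10:Int) ^ (c9)]) '6'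
        = (1 * (10:Int) ^ (c1) + 2 * (10:Int) ^ (c2) + 3 * (10:Int) ^ (c3) + 4 * (10:Int) ^ (c4) + 5 * (10:Int) ^ (c5) + 6 * (10:Int) ^ ((c6 + 1)) + 7 * (10:Int) ^ (c7) + 8 * (10:Int) ^ (c8) + 9 * (10:Int) ^ (c9), [0, 1 * (10:Int) ^ (c1), 2 * (10:Int) ^ (c2), 3 * (10:Int) ^ (c3), 4 * (10:Int) ^ (c4), 5 * (10:Int) ^ (c5), 6 * (10:Int) ^ ((c6 + 1)), 7 * (10:Int) ^ (c7), 8 * (10:Int) ^ (c8), 9 * (10:Int) ^ (c9)]) := by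
      simp only [pvStep, show Char.toNat '6' = 54 from rfl]
      norm_num [show Int.toNat 6 = 6 from rfl, List.getD, List.set]
      and_intros <;> ring
    rw [List.foldl_cons, hstep, ih]
    simp
    ring
  by_cases h7 : ch = '7'
  · subst h7
    have hstep : pvStep (1 * (10:Int) ^ (c1) + 2 * (10:Int) ^ (c2) + 3 * (10:Int) ^ (c3) + 4 * (10:Int) ^ (c4) + 5 * (10:Int) ^ (c5) + 6 * (10:Int) ^ (c6) + 7 * (10:Int) ^ (c7) + 8 * (10:Int) ^ (c8) + 9 * (10:Int) ^ (c9), [0, 1 * (10:Int) ^ (c1), 2 * (10:Int) ^ (c2), 3 * (10:Int) ^ (c3), 4 * (10:Int) ^ (c4), 5 * (10:Int) ^ (c5), 6 * (10:Int) ^ (c6), 7 * (10:Int) ^ (c7), 8 * (10:Int) ^ (c8), 9 * (10:Int) ^ (c9)]) '7'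
        = (1 * (10:Int) ^ (c1) + 2 * (10:Int) ^ (c2) + 3 * (10:Int) ^ (c3) + 4 * (10:Int) ^ (c4) + 5 * (10:Int) ^ (c5) + 6 * (10:Int) ^ (c6) + 7 * (10:Int) ^ ((c7 + 1)) + 8 * (10:Int) ^ (c8) + 9 * (10:Int) ^ (c9), [0, 1 * (10:Int) ^ (c1), 2 * (10:Int) ^ (c2), 3 * (10:Int) ^ (c3), 4 * (10:Int) ^ (c4), 5 * (10:Int) ^ (c5), 6 * (10:Int) ^ (c6), 7 * (10:Int) ^ ((c7 + 1)), 8 * (10:Int) ^ (c8), 9 * (10:Int) ^ (c9)]) := by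
      simp only [pvStep, show Char.toNat '7' = 55 from rfl]
      norm_num [show Int.toNat 7 = 7 from rfl, List.getD, List.set]
      and_intros <;> ring
    rw [List.foldl_cons, hstep, ih]
    simp
    ring
  by_cases h8 : ch = '8'
  · subst h8
    have hstep : pvStep (1 * (10:Int) ^ (c1) + 2 * (10:Int) ^ (c2) + 3 * (10:Int) ^ (c3) + 4 * (10:Int) ^ (c4) + 5 * (10:Int) ^ (c5) + 6 * (10:Int) ^ (c6) + 7 * (10:Int) ^ (c7) + 8 * (10:Int) ^ (c8) + 9 * (10:Int) ^ (c9), [0, 1 * (10:Int) ^ (c1), 2 * (10:Int) ^ (c2), 3 * (10:Int) ^ (c3), 4 * (10:Int) ^ (c4), 5 * (10:Int) ^ (c5), 6 * (10:Int) ^ (c6), 7 * (10:Int) ^ (c7), 8 * (10:Int) ^ (c8), 9 * (10:Int) ^ (c9)]) '8'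
        = (1 * (10:Int) ^ (c1) + 2 * (10:Int) ^ (c2) + 3 * (10:Int) ^ (c3) + 4 * (10:Int) ^ (c4) + 5 * (10:Int) ^ (c5) + 6 * (10:Int) ^ (c6) + 7 * (10:Int) ^ (c7) + 8 * (10:Int) ^ ((c8 + 1)) + 9 * (10:Int) ^ (c9), [0, 1 * (10:Int) ^ (c1), 2 * (10:Int) ^ (c2), 3 * (10:Int) ^ (c3), 4 * (10:Int) ^ (c4), 5 * (10:Int) ^ (c5), 6 * (10:Int) ^ (c6), 7 * (10:Int) ^ (c7), 8 * (10:Int) ^ ((c8 + 1)), 9 * (10:Int) ^ (c9)]) := by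
      simp only [pvStep, show Char.toNat '8' = 56 from rfl]
      norm_num [show Int.toNat 8 = 8 from rfl, List.getD, List.set]
      and_intros <;> ring
    rw [List.foldl_cons, hstep, ih]
    simp
    ring
  by_cases h9 : ch = '9'
  · subst h9
    have hstep : pvStep (1 * (10:Int) ^ (c1) + 2 * (10:Int) ^ (c2) + 3 * (10:Int) ^ (c3) + 4 * (10:Int) ^ (c4) + 5 * (10:Int) ^ (c5) + 6 * (10:Int) ^ (c6) + 7 * (10:Int) ^ (c7) + 8 * (10:Int) ^ (c8) + 9 * (10:Int) ^ (c9), [0, 1 * (10:Int) ^ (c1), 2 * (10:Int) ^ (c2), 3 * (10:Int) ^ (c3), 4 * (10:Int) ^ (c4), 5 * (10:Int) ^ (c5), 6 * (10:Int) ^ (c6), 7 * (10:Int) ^ (c7), 8 * (10:Int) ^ (c8), 9 * (10:Int) ^ (c9)]) '9'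
        = (1 * (10:Int) ^ (c1) + 2 * (10:Int) ^ (c2) + 3 * (10:Int) ^ (c3) + 4 * (10:Int) ^ (c4) + 5 * (10:Int) ^ (c5) + 6 * (10:Int) ^ (c6) + 7 * (10:Int) ^ (c7) + 8 * (10:Int) ^ (c8) + 9 * (10:Int) ^ ((c9 + 1)), [0, 1 * (10:Int) ^ (c1), 2 * (10:Int) ^ (c2), 3 * (10:Int) ^ (c3), 4 * (10:Int) ^ (c4), 5 * (10:Int) ^ (c5), 6 * (10:Int) ^ (c6), 7 * (10:Int) ^ (c7), 8 * (10:Int) ^ (c8), 9 * (10:Int) ^ ((c9 + 1))]) := by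
      simp only [pvStep, show Char.toNat '9' = 57 from rfl]
      norm_num [show Int.toNat 9 = 9 from rfl, List.getD, List.set]
      and_intros <;> ring
    rw [List.foldl_cons, hstep, ih]
    simp
    ring
  -- ch is not a digit 1..9: the step is the identity and no count changes
  have hcond : ¬(1 ≤ ((ch.toNat : Int) - 48) ∧ ((ch.toNat : Int) - 48) ≤ 9) := by
    rintro ⟨ha, hb⟩
    have hch : ch = Char.ofNat ch.toNat := (Char.ofNat_toNat ch).symm
    have hn : ch.toNat = 49 ∨ ch.toNat = 50 ∨ ch.toNat = 51 ∨ ch.toNat = 52 ∨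
        ch.toNat = 53 ∨ ch.toNat = 54 ∨ ch.toNat = 55 ∨ ch.toNat = 56 ∨ ch.toNat = 57 := by
      omega
    rcases hn with h | h | h | h | h | h | h | h | h
    · exact h1 (by rw [hch, h])
    · exact h2 (by rw [hch, h])
    · exact h3 (by rw [hch, h])
    · exact h4 (by rw [hch, h])
    · exact h5 (by rw [hch, h])
    · exact h6 (by rw [hch, h])
    · exact h7 (by rw [hch, h])
    · exact h8 (by rw [hch, h])
    · exact h9 (by rw [hch, h])
  have hstep : pvStep (1 * (10:Int) ^ (c1) + 2 * (10:Int) ^ (c2) + 3 * (10:Int) ^ (c3) + 4 * (10:Int) ^ (c4) + 5 * (10:Int) ^ (c5) + 6 * (10:Int) ^ (c6) + 7 * (10:Int) ^ (c7) + 8 * (10:Int) ^ (c8) + 9 * (10:Int) ^ (c9), [0, 1 * (10:Int) ^ (c1), 2 * (10:Int) ^ (c2), 3 * (10:Int) ^ (c3), 4 * (10:Int) ^ (c4), 5 * (10:Int) ^ (c5), 6 * (10:Int) ^ (c6), 7 * (10:Int) ^ (c7), 8 * (10:Int) ^ (c8), 9 * (10:Int) ^ (c9)]) ch = (1 * (10:Int)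 ^ (c1) + 2 * (10:Int) ^ (c2) + 3 * (10:Int) ^ (c3) + 4 * (10:Int) ^ (c4) + 5 * (10:Int) ^ (c5) + 6 * (10:Int) ^ (c6) + 7 * (10:Int) ^ (c7) + 8 * (10:Int) ^ (c8) + 9 * (10:Int) ^ (c9), [0, 1 * (10:Int) ^ (c1), 2 * (10:Int) ^ (c2), 3 * (10:Int) ^ (c3), 4 * (10:Int) ^ (c4), 5 * (10:Int) ^ (c5), 6 * (10:Int) ^ (c6), 7 * (10:Int) ^ (c7), 8 * (10:Int) ^ (c8), 9 * (10:Int) ^ (c9)]) := by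
    simp only [pvStep]
    rw [if_neg hcond]
  rw [List.foldl_cons, hstep, ih]
  simp [h1, h2, h3, h4, h5, h6, h7, h8, h9]

-- B's pass, started from the all-zero-counts state Source B uses, yields the digit-count score
theorem pvScore_eq (s : String) :
    pvScore s
      = 1 * (10:Int) ^ (s.toList.count '1') + 2 * 10 ^ (s.toList.count '2')
        + 3 * 10 ^ (s.toList.count '3') + 4 * 10 ^ (s.toList.count '4')
        + 5 * 10 ^ (s.toList.count '5') + 6 * 10 ^ (s.toList.count '6')
        + 7 * 10 ^ (s.toList.count '7') + 8 * 10 ^ (s.toList.count '8')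
        + 9 * 10 ^ (s.toList.count '9') := by
  have h := tally_inv s.toList 0 0 0 0 0 0 0 0 0
  norm_num at h
  unfold pvScore
  rw [h]
  norm_num

theorem if_gt_eq_decide (a b a' b' : Int) (h1 : a = a') (h2 : b = b') :
    (if a > b then true else false) = decide (a' > b') := by
  subst h1; subst h2
  by_cases h : a > b <;> simp [h]

theorem solve_eq_alt (s t : String) : solve s t = solve_alt s t := by
  unfold solve solve_alt
  rw [show PySem.List.pyRange 1 10 1 = [1, 2, 3, 4, 5, 6, 7, 8, 9] from by decide]
  have h1 : PySem.Int.toStr 1 = String.ofList ['1'] := by decide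
  have h2 : PySem.Int.toStr 2 = String.ofList ['2'] := by decide
  have h3 : PySem.Int.toStr 3 = String.ofList ['3'] := by decide
  have h4 : PySem.Int.toStr 4 = String.ofList ['4'] := by decide
  have h5 : PySem.Int.toStr 5 = String.ofList ['5'] := by decide
  have h6 : PySem.Int.toStr 6 = String.ofList ['6'] := by decide
  have h7 : PySem.Int.toStr 7 = String.ofList ['7'] := by decide
  have h8 : PySem.Int.toStr 8 = String.ofList ['8'] := by decide
  have h9 : PySem.Int.toStr 9 = String.ofList ['9'] := by decide
  simp only [List.foldl, h1, h2, h3, h4, h5, h6, h7, h8, h9, inner_count, Int.toNat_natCast]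
  rw [pvScore_eq s, pvScore_eq t]
  exact if_gt_eq_decide _ _ _ _ (by ring) (by ring)

-- ===== VERDICT (by name: the statement is the Claim_ definition above) =====
theorem solve_spec : Claim_equal_solve := by
  intro s t _
  unfold Spec_solve
  exact solve_eq_alt s t
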